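-- pv_equiv track=rewrite | github.com/ludwigax/Directed-Acyclic-Graph | dag/dsl.py | _rewrite_parameter_placeholders
-- ===== SOURCE A (Python) =====
-- from typing import Any, Dict, Iterable, List, Mapping, MutableMapping, Optional, Tuple
--
-- def _rewrite_parameter_placeholders(expression: str) -> str:
--     result: List[str] = []
--     length = len(expression)
--     i = 0
--     while i < length:
--         if expression.startswith("Param.", i):
--             start = i + len("Param.")
--             if start >= length or not (expression[start].isalpha() or expression[start] == "_"):
--                 result.append("Param.")
--                 i = start
--                 continue
--             end = start
--             while end < length and (expression[end].isalnum() or expression[end] == "_"):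
--                 end += 1
--             name = expression[start:end]
--             idx = end
--             while idx < length and expression[idx].isspace():
--                 idx += 1
--             if idx < length and expression[idx] == ":":
--                 idx += 1
--                 default_expr, next_index = _extract_default_expression(expression, idx)
--                 result.append(f"Param.with_default('{name}', {default_expr})")
--                 i = next_index
--                 continue
--             result.append(f"Param.get('{name}')")
--             i = end
--         else:
--             result.append(expression[i])
--             i += 1
--     return "".join(result)
--
-- def _extract_default_expression(expression: str, start: int) -> Tuple[str, int]:
--     depth_paren = depth_bracket = depth_brace = 0
--     i = start
--     length = len(expression)
--     while i < length:
--         ch = expression[i]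
--         if ch == "(":
--             depth_paren += 1
--         elif ch == ")":
--             if depth_paren == 0 and depth_bracket == 0 and depth_brace == 0:
--                 break
--             depth_paren = max(0, depth_paren - 1)
--         elif ch == "[":
--             depth_bracket += 1
--         elif ch == "]":
--             if depth_paren == 0 and depth_bracket == 0 and depth_brace == 0:
--                 break
--             depth_bracket = max(0, depth_bracket - 1)
--         elif ch == "{":
--             depth_brace += 1
--         elif ch == "}":
--             if depth_paren == 0 and depth_bracket == 0 and depth_brace == 0:
--                 break
--             depth_brace = max(0, depth_brace - 1)
--         elif ch == "," and depth_paren == 0 and depth_bracket == 0 and depth_brace == 0: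
--             break
--         i += 1
--     segment = expression[start:i].strip()
--     return segment, i
-- ===== SOURCE B (Python) =====
-- from typing import List, Tuple
--
-- def _rewrite_parameter_placeholders(expression: str) -> str:
--     out: List[str] = []
--     for tok in _tokenize(expression):
--         if tok[0] == "lit":
--             out.append(tok[1])
--         elif tok[0] == "get":
--             out.append("Param.get('%s')" % tok[1])
--         else:
--             out.append("Param.with_default('%s', %s)" % (tok[1], tok[2]))
--     return "".join(out)
--
-- def _tokenize(expression: str) -> List[Tuple[str, ...]]:
--     tokens: List[Tuple[str, ...]] = []
--     cursor = 0
--     length = len(expression)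
--     while True:
--         pos = expression.find("Param.", cursor)
--         if pos == -1:
--             tokens.append(("lit", expression[cursor:]))
--             return tokens
--         tokens.append(("lit", expression[cursor:pos]))
--         start = pos + 6
--         if start < length and (expression[start].isalpha() or expression[start] == "_"):
--             end = start
--             while end < length and (expression[end].isalnum() or expression[end] == "_"):
--                 end += 1
--             name = expression[start:end]
--             idx = end
--             while idx < length and expression[idx].isspace():
--                 idx += 1
--             if idx < length and expression[idx] == ":":
--                 default_expr, cursor = _extract_default_expression(expression, idx + 1)
--                 tokens.append(("def", name, default_expr))
--             else:
--                 tokens.append(("get", name))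
--                 cursor = end
--         else:
--             tokens.append(("lit", "Param."))
--             cursor = start
--
-- def _extract_default_expression(expression: str, start: int) -> Tuple[str, int]:
--     depth_paren = depth_bracket = depth_brace = 0
--     i = start
--     length = len(expression)
--     while i < length:
--         ch = expression[i]
--         if ch == "(":
--             depth_paren += 1
--         elif ch == ")":
--             if depth_paren == 0 and depth_bracket == 0 and depth_brace == 0:
--                 break
--             depth_paren = max(0, depth_paren - 1)
--         elif ch == "[":
--             depth_bracket += 1
--         elif ch == "]":
--             if depth_paren == 0 and depth_bracket == 0 and depth_brace == 0:
--                 break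
--             depth_bracket = max(0, depth_bracket - 1)
--         elif ch == "{":
--             depth_brace += 1
--         elif ch == "}":
--             if depth_paren == 0 and depth_bracket == 0 and depth_brace == 0:
--                 break
--             depth_brace = max(0, depth_brace - 1)
--         elif ch == "," and depth_paren == 0 and depth_bracket == 0 and depth_brace == 0:
--             break
--         i += 1
--     segment = expression[start:i].strip()
--     return segment, i
-- ===== Notes on version B (the rewrite author's own statement) =====
-- stated objective: faster
-- what changed: B is a two-stage pipeline: a tokenizer first turns the string into a list of tokens (literal span / get(name) / with_default(name,expr)) using a find-and-splice cursor loop (str.find skips between hits in bulk) instead of A's per-character startswith scan, and a separate render pass then formats and joins the tokens.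
import Mathlib
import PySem

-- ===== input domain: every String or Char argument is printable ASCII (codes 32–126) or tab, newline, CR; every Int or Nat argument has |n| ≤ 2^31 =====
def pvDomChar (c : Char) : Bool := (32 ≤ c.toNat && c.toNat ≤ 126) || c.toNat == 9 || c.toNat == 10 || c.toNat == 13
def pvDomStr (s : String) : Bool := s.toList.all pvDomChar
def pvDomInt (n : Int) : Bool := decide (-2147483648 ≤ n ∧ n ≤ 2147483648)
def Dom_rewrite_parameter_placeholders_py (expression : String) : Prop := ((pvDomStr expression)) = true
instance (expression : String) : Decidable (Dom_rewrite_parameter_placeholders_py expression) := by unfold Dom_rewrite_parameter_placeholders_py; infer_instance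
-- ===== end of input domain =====

-- B replaces A's single per-character scan-and-format loop by a two-stage pipeline:
-- a find-and-splice tokenizer producing a token list, then a separate render/join pass.

-- ===== helpers shared verbatim by Source A and Source B (the balanced-delimiter extractor) =====
-- the literal "Param."
def pvPname : List Char := ['P', 'a', 'r', 'a', 'm', '.']

-- name characters: isalnum or underscore
def pvNameChar (c : Char) : Bool := PySem.Chars.isalnum c || c == '_'

-- _extract_default_expression's while loop: returns (consumed chars, remaining suffix)
def pvExtGo (dp db dc : Nat) : List Char → List Char × List Char
  | [] => ([], [])
  | c :: t =>
    if c = '(' then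
      let r := pvExtGo (dp + 1) db dc t; (c :: r.1, r.2)
    else if c = ')' then
      if dp = 0 ∧ db = 0 ∧ dc = 0 then ([], c :: t)
      else let r := pvExtGo (dp - 1) db dc t; (c :: r.1, r.2)
    else if c = '[' then
      let r := pvExtGo dp (db + 1) dc t; (c :: r.1, r.2)
    else if c = ']' then
      if dp = 0 ∧ db = 0 ∧ dc = 0 then ([], c :: t)
      else let r := pvExtGo dp (db - 1) dc t; (c :: r.1, r.2)
    else if c = '{' then
      let r := pvExtGo dp db (dc + 1) t; (c :: r.1, r.2)
    else if c = '}' then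
      if dp = 0 ∧ db = 0 ∧ dc = 0 then ([], c :: t)
      else let r := pvExtGo dp db (dc - 1) t; (c :: r.1, r.2)
    else if c = ',' ∧ dp = 0 ∧ db = 0 ∧ dc = 0 then ([], c :: t)
    else
      let r := pvExtGo dp db dc t; (c :: r.1, r.2)

-- _extract_default_expression: (stripped segment, remaining suffix after it)
def pvExtract (s : List Char) : List Char × List Char :=
  let r := pvExtGo 0 0 0 s
  (PySem.Chars.strip r.1, r.2)

theorem pvExtGo_snd_len : ∀ (dp db dc : Nat) (s : List Char),
    (pvExtGo dp db dc s).2.length ≤ s.length := by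
  intro dp db dc s
  induction s generalizing dp db dc with
  | nil => simp [pvExtGo]
  | cons c t ih =>
    simp only [pvExtGo]
    split_ifs <;> simp <;> exact le_trans (ih _ _ _) (Nat.le_succ _)

theorem pvExtract_snd_len (s : List Char) : (pvExtract s).2.length ≤ s.length :=
  pvExtGo_snd_len 0 0 0 s

-- length bounds used by the ports' termination arguments
theorem pvLtA_nil (c : Char) (t : List Char) : ([] : List Char).length < (c :: t).length := by
  simp

theorem pvLtA_drop (c : Char) (t : List Char) : ((c :: t).drop 6).length < (c :: t).length := by
  simp only [List.length_drop, List.length_cons]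
  omega

theorem pvLt_extract_chain (l : List Char) (r : List Char) (h : r.length < l.length) :
    (pvExtract (((r.dropWhile pvNameChar).dropWhile PySem.Chars.isspace).drop 1)).2.length < l.length := by
  have h2 := pvExtract_snd_len (((r.dropWhile pvNameChar).dropWhile PySem.Chars.isspace).drop 1)
  have h3 := List.length_dropWhile_le (p := pvNameChar) (l := r)
  have h4 := List.length_dropWhile_le (p := PySem.Chars.isspace) (l := r.dropWhile pvNameChar)
  have h5 := List.length_drop (l := (r.dropWhile pvNameChar).dropWhile PySem.Chars.isspace) (i := 1)
  omega

theorem pvLt_dropWhile_chain (l : List Char) (r : List Char) (h : r.length < l.length) :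
    (r.dropWhile pvNameChar).length < l.length := by
  have h3 := List.length_dropWhile_le (p := pvNameChar) (l := r)
  omega

theorem pvLtA_tail (c : Char) (t : List Char) : t.length < (c :: t).length := by
  simp

-- ===== PORT A =====
-- f"Param.with_default('{name}', {default_expr})" and f"Param.get('{name}')"
def pvWithDefault (name dflt : List Char) : List Char :=
  "Param.with_default('".toList ++ name ++ "', ".toList ++ dflt ++ [')']

def pvGetStr (name : List Char) : List Char :=
  "Param.get('".toList ++ name ++ "')".toList

-- A's outer while loop, as structural recursion over the remaining suffix.
-- `rest.headD ' '` ports `expression[start]`: the index is guarded by the emptiness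
-- test (`start >= length`), so the default is never read.
def pvGoA : List Char → List Char
  | [] => []
  | c :: t =>
    if PySem.Chars.startswith (c :: t) pvPname then
      let rest := (c :: t).drop 6
      if h0 : rest = [] then pvPname ++ pvGoA []
      else if !(PySem.Chars.isalpha (rest.headD ' ') || rest.headD ' ' == '_') then
        pvPname ++ pvGoA rest
      else
        let name := rest.takeWhile pvNameChar
        let afterName := rest.dropWhile pvNameChar
        let afterWs := afterName.dropWhile PySem.Chars.isspace
        if afterWs.head? == some ':' then
          let pr := pvExtract (afterWs.drop 1)
          pvWithDefault name pr.1 ++ pvGoA pr.2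
        else pvGetStr name ++ pvGoA afterName
    else c :: pvGoA t
termination_by s => s.length
decreasing_by
  · exact pvLtA_nil c t
  · exact pvLtA_drop c t
  · exact pvLt_extract_chain (c :: t) _ (pvLtA_drop c t)
  · exact pvLt_dropWhile_chain (c :: t) _ (pvLtA_drop c t)
  · exact pvLtA_tail c t

def rewrite_parameter_placeholders_py (expression : String) : String :=
  String.ofList (pvGoA expression.toList)

-- ===== PORT B =====
-- tokens produced by _tokenize: a literal span, a plain placeholder, or one with a default
inductive PvTok where
  | lit : List Char → PvTok
  | get : List Char → PvTok
  | withdef : List Char → List Char → PvTok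
deriving DecidableEq, Repr

-- a 'Param.' hit forces the string to be nonempty (used by the tokenizer's termination)
theorem pvFind_ne_imp_pos {s : List Char} (h : PySem.Chars.find s pvPname ≠ -1) :
    0 < s.length := by
  have hinf : pvPname <:+: s := (PySem.Chars.find_ne_neg_one_iff s pvPname).mp h
  have := hinf.length_le
  simp [pvPname] at this
  omega

theorem pvLtB_drop (s : List Char) (p : Nat) (h : 0 < s.length) :
    (s.drop (p + 6)).length < s.length := by
  simp only [List.length_drop]
  omega

theorem pvLtB_span (s rest : List Char) (h : rest.length < s.length) :
    (rest.span pvNameChar).2.length < s.length := by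
  have := List.length_dropWhile_le (p := pvNameChar) (l := rest)
  simp only [List.span_eq_takeWhile_dropWhile]
  omega

theorem pvLtB_extract (s rest : List Char) (h : rest.length < s.length) :
    (pvExtract ((((rest.span pvNameChar).2).dropWhile PySem.Chars.isspace).drop 1)).2.length < s.length := by
  simp only [List.span_eq_takeWhile_dropWhile]
  exact pvLt_extract_chain s rest h

-- _tokenize: find-and-splice cursor loop, emitting tokens
def pvTokenize (s : List Char) : List PvTok :=
  if hf : PySem.Chars.find s pvPname = -1 then [PvTok.lit s]
  else
    let p := (PySem.Chars.find s pvPname).toNat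
    let pre := s.take p
    let rest := s.drop (p + 6)
    if hv : rest ≠ [] ∧ (PySem.Chars.isalpha (rest.headD ' ') || rest.headD ' ' == '_') = true then
      let nm := rest.span pvNameChar
      let afterWs := nm.2.dropWhile PySem.Chars.isspace
      if afterWs.head? == some ':' then
        let pr := pvExtract (afterWs.drop 1)
        PvTok.lit pre :: PvTok.withdef nm.1 pr.1 :: pvTokenize pr.2
      else
        PvTok.lit pre :: PvTok.get nm.1 :: pvTokenize nm.2
    else
      PvTok.lit pre :: PvTok.lit pvPname :: pvTokenize rest
termination_by s.length
decreasing_by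
  · exact pvLtB_extract s _ (pvLtB_drop s _ (pvFind_ne_imp_pos hf))
  · exact pvLtB_span s _ (pvLtB_drop s _ (pvFind_ne_imp_pos hf))
  · exact pvLtB_drop s _ (pvFind_ne_imp_pos hf)

-- the render loop's body: format one token
def pvRender : PvTok → List Char
  | PvTok.lit l => l
  | PvTok.get n => "Param.get('".toList ++ n ++ "')".toList
  | PvTok.withdef n d => "Param.with_default('".toList ++ n ++ "', ".toList ++ d ++ [')']

def rewrite_parameter_placeholders_py_alt (expression : String) : String :=
  String.ofList ((pvTokenize expression.toList).flatMap pvRender)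

-- ===== PRECONDITION & SPEC =====
def Spec_rewrite_parameter_placeholders_py (expression : String) (out : String) : Prop := out = rewrite_parameter_placeholders_py_alt expression
instance (expression : String) (out : String) : Decidable (Spec_rewrite_parameter_placeholders_py expression out) := by unfold Spec_rewrite_parameter_placeholders_py; infer_instance

-- ===== CLAIM (what is proved, stated in full; the proofs are below) =====
def Claim_equal_rewrite_parameter_placeholders_py : Prop := ∀ (expression : String), Dom_rewrite_parameter_placeholders_py expression → Spec_rewrite_parameter_placeholders_py expression (rewrite_parameter_placeholders_py expression)

-- ===== LEMMAS AND PROOFS =====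

-- A copies chars verbatim across a region with no 'Param.' prefix
theorem pvGoA_split (n : Nat) (s : List Char) (hn : n ≤ s.length)
    (h : ∀ i < n, ¬ pvPname <+: s.drop i) :
    pvGoA s = s.take n ++ pvGoA (s.drop n) := by
  induction n generalizing s with
  | zero => simp
  | succ k ih =>
    match s with
    | [] => simp at hn
    | c :: t =>
      have h0 : ¬ pvPname <+: (c :: t) := by simpa using h 0 (Nat.succ_pos k)
      have hsw : PySem.Chars.startswith (c :: t) pvPname = false := by
        rw [Bool.eq_false_iff]
        intro hc
        exact h0 ((PySem.Chars.startswith_iff _ _).mp hc)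
      rw [pvGoA, hsw]
      simp only [Bool.false_eq_true, if_false]
      have ht : pvGoA t = t.take k ++ pvGoA (t.drop k) := by
        apply ih
        · simpa using hn
        · intro i hi
          simpa using h (i + 1) (by omega)
      rw [ht]; simp

theorem pvGoA_id_of_no_find {s : List Char} (h : PySem.Chars.find s pvPname = -1) :
    pvGoA s = s := by
  have hinf : ¬ pvPname <:+: s := (PySem.Chars.find_eq_neg_one_iff s pvPname).mp h
  have := pvGoA_split s.length s (le_refl _) (by
    intro i _ hp
    exact hinf (hp.isInfix.trans (s.drop_suffix i).isInfix))
  simpa [pvGoA] using this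

-- unfolding pvGoA at a hit: the suffix starts with 'Param.'
theorem pvGoA_hit (r : List Char) :
    pvGoA (pvPname ++ r) =
      (if _ : r = [] then pvPname ++ pvGoA []
       else if !(PySem.Chars.isalpha (r.headD ' ') || r.headD ' ' == '_') then
         pvPname ++ pvGoA r
       else
         let name := r.takeWhile pvNameChar
         let afterName := r.dropWhile pvNameChar
         let afterWs := afterName.dropWhile PySem.Chars.isspace
         if afterWs.head? == some ':' then
           let pr := pvExtract (afterWs.drop 1)
           pvWithDefault name pr.1 ++ pvGoA pr.2
         else pvGetStr name ++ pvGoA afterName) := by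
  have hsw : PySem.Chars.startswith (pvPname ++ r) pvPname = true :=
    (PySem.Chars.startswith_iff _ _).mpr (List.prefix_append _ _)
  have hcons : pvPname ++ r = 'P' :: 'a' :: 'r' :: 'a' :: 'm' :: '.' :: r := by simp [pvPname]
  rw [hcons] at hsw ⊢
  have hdrop : ('P' :: 'a' :: 'r' :: 'a' :: 'm' :: '.' :: r).drop 6 = r := rfl
  conv_lhs => rw [pvGoA]
  simp only [hsw, hdrop, if_true]

-- main equivalence on lists: A's single pass equals tokenize-then-render
theorem pvGoA_eq_render (s : List Char) :
    pvGoA s = (pvTokenize s).flatMap pvRender := by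
  by_cases hf : PySem.Chars.find s pvPname = -1
  · rw [pvTokenize, dif_pos hf, pvGoA_id_of_no_find hf]
    simp [pvRender]
  · have hpos : 0 ≤ PySem.Chars.find s pvPname := by
      have := PySem.Chars.neg_one_le_find s pvPname
      omega
    obtain ⟨hpref, hmin⟩ := PySem.Chars.find_spec (s := s) (sub := pvPname) hpos
    set p := (PySem.Chars.find s pvPname).toNat with hp
    have hple : p ≤ s.length := by
      have := PySem.Chars.find_le_length s pvPname
      omega
    have hsplit : pvGoA s = s.take p ++ pvGoA (s.drop p) := by
      exact pvGoA_split p s hple (fun i hi => hmin i hi)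
    obtain ⟨r, hr⟩ := hpref
    have hdrop : s.drop (p + 6) = r := by
      have h1 : (s.drop p).drop 6 = r := by
        rw [← hr]
        simpa [pvPname] using List.drop_left pvPname r
      rwa [List.drop_drop] at h1
    have hlen : p + 6 + r.length = s.length := by
      have h2 : (s.drop p).length = s.length - p := by simp
      rw [← hr] at h2; simp [pvPname] at h2
      omega
    have hrlen : r.length < s.length := by omega
    rw [pvTokenize, dif_neg hf]
    simp only [← hp, hdrop]
    rw [hsplit, ← hr, pvGoA_hit]
    by_cases hv : r ≠ [] ∧ (PySem.Chars.isalpha (r.headD ' ') || r.headD ' ' == '_') = true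
    · rw [dif_pos hv]
      obtain ⟨hr0, hval⟩ := hv
      rw [dif_neg hr0]
      have hval' : (!(PySem.Chars.isalpha (r.headD ' ') || r.headD ' ' == '_')) = false := by
        rw [hval]; rfl
      rw [if_neg (fun hc => by rw [hval'] at hc; exact Bool.false_ne_true hc)]
      simp only [List.span_eq_takeWhile_dropWhile]
      set afterName := r.dropWhile pvNameChar with han
      set afterWs := afterName.dropWhile PySem.Chars.isspace with haw
      have hanlen : afterName.length < s.length := by
        have := List.length_dropWhile_le (p := pvNameChar) (l := r)
        rw [← han] at this
        omega
      by_cases hcol : (afterWs.head? == some ':') = true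
      · rw [if_pos hcol, if_pos hcol]
        have hprlen : (pvExtract (afterWs.drop 1)).2.length < s.length := by
          have h2 := pvExtract_snd_len (afterWs.drop 1)
          have h5 := List.length_drop (l := afterWs) (i := 1)
          have h4 := List.length_dropWhile_le (p := PySem.Chars.isspace) (l := afterName)
          rw [← haw] at h4
          omega
        rw [pvGoA_eq_render (pvExtract (afterWs.drop 1)).2]
        simp [pvRender, pvWithDefault]
      · rw [if_neg hcol, if_neg hcol]
        rw [pvGoA_eq_render afterName]
        simp [pvRender, pvGetStr]
    · rw [dif_neg hv]
      by_cases hr0 : r = []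
      · subst hr0
        rw [dif_pos rfl]
        have hB : pvTokenize [] = [PvTok.lit []] := by
          rw [pvTokenize, dif_pos]
          rw [PySem.Chars.find_eq_neg_one_iff]
          intro hinf
          have := hinf.length_le
          simp [pvPname] at this
        have hA : pvGoA [] = [] := by rw [pvGoA]
        rw [hA, hB]; simp [pvRender]
      · rw [dif_neg hr0]
        have hval : (!(PySem.Chars.isalpha (r.headD ' ') || r.headD ' ' == '_')) = true := by
          rcases Decidable.not_and_iff_or_not.mp hv with h | h
          · exact absurd hr0 (by simpa using h)
          · rw [Bool.not_eq_true']
            exact Bool.eq_false_iff.mpr h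
        rw [if_pos hval]
        rw [pvGoA_eq_render r]
        simp [pvRender]
termination_by s.length
decreasing_by
  · exact hprlen
  · exact hanlen
  · exact hrlen

-- ===== VERDICT (by name: the statement is the Claim_ definition above) =====
theorem rewrite_parameter_placeholders_py_spec : Claim_equal_rewrite_parameter_placeholders_py := by
  intro expression _
  show _ = _
  unfold rewrite_parameter_placeholders_py rewrite_parameter_placeholders_py_alt
  rw [pvGoA_eq_render]
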